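-- pv_equiv track=rewrite | github.com/ttzytt/PyAutoGrade | tests/Block 4/tested_code/18/Unit 1/List functions/list_functions_review.py | weird_double
-- ===== SOURCE A (Python) =====
-- def weird_double(numbers):
--     i = 0
--     result = []
--     if len(numbers) == 0:
--         return
--
--     while i < len(numbers):
--         if numbers[i] % 3 == 0:
--
--             result += [numbers[i]]
--             i += 1
--             skip = 0
--             while skip < 3 and i < len(numbers):
--                 result += [numbers[i]]
--                 i += 1
--                 skip += 1
--         else:
--             result += [numbers[i] * 2]
--             i += 1
--
--     return result
-- ===== SOURCE B (Python) =====
-- def weird_double(numbers):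
--     if len(numbers) == 0:
--         return
--     result = []
--     copy = 0
--     for x in numbers:
--         if copy > 0:
--             result.append(x)
--             copy -= 1
--         elif x % 3 == 0:
--             result.append(x)
--             copy = 3
--         else:
--             result.append(x * 2)
--     return result
-- ===== Notes on version B (the rewrite author's own statement) =====
-- stated objective: faster
-- what changed: Replaced A's nested while loops with manual index arithmetic and list-concatenation appends by a single for-loop over the elements threading a 'copy' countdown, using list.append; same O(n) algorithmic shape but a cheaper per-element mechanism.
import Mathlib
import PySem

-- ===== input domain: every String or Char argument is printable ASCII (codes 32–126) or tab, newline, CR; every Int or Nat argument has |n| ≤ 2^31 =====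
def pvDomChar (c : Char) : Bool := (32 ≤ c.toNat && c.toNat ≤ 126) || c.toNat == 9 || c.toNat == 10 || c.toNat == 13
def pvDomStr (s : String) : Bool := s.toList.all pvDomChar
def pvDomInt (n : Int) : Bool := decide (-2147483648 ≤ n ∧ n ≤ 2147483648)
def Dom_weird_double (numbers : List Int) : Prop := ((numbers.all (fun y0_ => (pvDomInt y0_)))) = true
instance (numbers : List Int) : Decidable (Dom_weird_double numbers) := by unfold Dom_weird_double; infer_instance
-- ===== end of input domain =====

-- B replaces A's nested while loops (index + inner copy loop) by one for-loop threading a copy countdown; objective: simpler.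


-- ===== PORT A =====
-- A's outer while advances index i; on a multiple of 3 it appends it and the inner
-- while copies up to 3 following elements. Ported as recursion on the list suffix:
-- the inner while is 'take 3' of the rest and the index jump is 'drop 3'.
def weird_double_loop (xs : List Int) : List Int :=
  match xs with
  | [] => []
  | x :: rest =>
    if PySem.Int.mod x 3 = 0 then
      x :: (rest.take 3 ++ weird_double_loop (rest.drop 3))
    else
      x * 2 :: weird_double_loop rest
termination_by xs.length
decreasing_by
  all_goals simp [List.length_drop]

def weird_double (numbers : List Int) : Option (List Int) :=
  if numbers.length = 0 then none
  else some (weird_double_loop numbers)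

-- ===== PORT B =====
-- B's for-loop: state (result, copy); copy>0 copies the element, a multiple of 3
-- restarts the countdown at 3, otherwise the element is doubled.
def weird_double_step (st : List Int × Int) (x : Int) : List Int × Int :=
  if st.2 > 0 then (st.1 ++ [x], st.2 - 1)
  else if PySem.Int.mod x 3 = 0 then (st.1 ++ [x], 3)
  else (st.1 ++ [x * 2], st.2)

def weird_double_alt (numbers : List Int) : Option (List Int) :=
  if numbers.length = 0 then none
  else some ((numbers.foldl weird_double_step ([], 0)).1)

-- ===== PRECONDITION & SPEC =====
def Spec_weird_double (numbers : List Int) (out : Option (List Int)) : Prop := out = weird_double_alt numbers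
instance (numbers : List Int) (out : Option (List Int)) : Decidable (Spec_weird_double numbers out) := by unfold Spec_weird_double; infer_instance

-- ===== CLAIM (what is proved, stated in full; the proofs are below) =====
def Claim_equal_weird_double : Prop := ∀ (numbers : List Int), Dom_weird_double numbers → Spec_weird_double numbers (weird_double numbers)

-- ===== LEMMAS AND PROOFS =====

-- Proof-only model of B's loop body as plain recursion building the list front-to-back.
def bLoop (xs : List Int) (c : Int) : List Int :=
  match xs with
  | [] => []
  | x :: rest =>
    if c > 0 then x :: bLoop rest (c - 1)
    else if PySem.Int.mod x 3 = 0 then x :: bLoop rest 3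
    else x * 2 :: bLoop rest c

theorem foldl_step_eq (xs : List Int) : ∀ (res : List Int) (c : Int),
    (xs.foldl weird_double_step (res, c)).1 = res ++ bLoop xs c := by
  induction xs with
  | nil => simp [bLoop]
  | cons x rest ih =>
    intro res c
    by_cases h : c > 0
    · simp [weird_double_step, bLoop, h, ih]
    · by_cases h3 : (3:Int) ∣ x
      · simp [weird_double_step, bLoop, h, h3, ih]
      · simp [weird_double_step, bLoop, h, h3, ih]

theorem bLoop_copy (n : Nat) : ∀ (xs : List Int),
    bLoop xs (n : Int) = xs.take n ++ bLoop (xs.drop n) 0 := by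
  induction n with
  | zero => intro xs; simp
  | succ k ih =>
    intro xs
    cases xs with
    | nil => simp [bLoop]
    | cons x rest =>
      have hpos : ((k : Int) + 1) > 0 := by positivity
      have : ((k : Int) + 1) - 1 = (k : Int) := by ring
      simp [bLoop, hpos, this, ih rest]

theorem loopA_eq_bLoop_bounded (n : Nat) : ∀ xs : List Int, xs.length ≤ n →
    weird_double_loop xs = bLoop xs 0 := by
  induction n with
  | zero =>
    intro xs h
    have : xs = [] := List.eq_nil_of_length_eq_zero (by omega)
    simp [this, weird_double_loop, bLoop]
  | succ k ih =>
    intro xs h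
    cases xs with
    | nil => simp [weird_double_loop, bLoop]
    | cons x rest =>
      rw [weird_double_loop, bLoop]
      by_cases h3 : (3:Int) ∣ x
      · simp only [PySem.Int.mod_eq_zero_iff_dvd, h3, if_true,
          show ¬((0:Int) > 0) by omega, if_false]
      
        rw [ih (rest.drop 3) (by simp at h ⊢; omega),
          show (3:Int) = ((3:Nat):Int) by norm_num, bLoop_copy]
      · simp only [PySem.Int.mod_eq_zero_iff_dvd, h3, if_false,
          show ¬((0:Int) > 0) by omega]
        rw [ih rest (by simp at h; omega)]

theorem loopA_eq_bLoop (xs : List Int) : weird_double_loop xs = bLoop xs 0 :=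
  loopA_eq_bLoop_bounded xs.length xs le_rfl

-- ===== VERDICT (by name: the statement is the Claim_ definition above) =====
theorem weird_double_spec : Claim_equal_weird_double := by
  intro numbers _
  unfold Spec_weird_double weird_double weird_double_alt
  by_cases h : numbers.length = 0
  · simp [h]
  · simp [h, foldl_step_eq, loopA_eq_bLoop]
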